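-- pv_equiv track=rewrite | github.com/Team-AiK/TT-Thinking-Training | Week06/groovypark/2_hopscotch.py | hopscotch
-- ===== SOURCE A (Python) =====
-- def hopscotch(board, size):
--     # 땅따먹기 게임으로 얻을 수 있는 최대 점수는?
--     sum_list = board[0]
--     for s in range(1,size):
--         current = board[s]
--         for i in range(4):
--             temp = []
--             for j in range(4):
--                 if i != j:
--                     temp.append(sum_list[j])
--             current[i] += max(temp)
--         sum_list = current
--
--     return max(sum_list)
-- ===== SOURCE B (Python) =====
-- def hopscotch(board, size):
--     # Note: like A, mutates the rows board[1..size-1] in place; equivalence is about the return value.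
--     sum_list = board[0]
--     for s in range(1, size):
--         current = board[s]
--         a, b, c, d = sum_list[0], sum_list[1], sum_list[2], sum_list[3]
--         # one pass keeping the two largest of the previous row's first four entries
--         if a >= b:
--             m1, m2 = a, b
--         else:
--             m1, m2 = b, a
--         if c > m1:
--             m1, m2 = c, m1
--         elif c > m2:
--             m2 = c
--         if d > m1:
--             m1, m2 = d, m1
--         elif d > m2:
--             m2 = d
--         for i in range(4):
--             current[i] += m2 if sum_list[i] == m1 else m1
--         sum_list = current
--     return max(sum_list)
-- ===== Notes on version B (the rewrite author's own statement) =====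
-- stated objective: alternative
-- what changed: Instead of rebuilding a 3-element temp list and calling max() on it for each of the 4 columns of every row, B makes one pass over the previous row's first four entries keeping its two largest values (m1, m2) and adds m2 to the column holding m1 and m1 to every other column.
import Mathlib
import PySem

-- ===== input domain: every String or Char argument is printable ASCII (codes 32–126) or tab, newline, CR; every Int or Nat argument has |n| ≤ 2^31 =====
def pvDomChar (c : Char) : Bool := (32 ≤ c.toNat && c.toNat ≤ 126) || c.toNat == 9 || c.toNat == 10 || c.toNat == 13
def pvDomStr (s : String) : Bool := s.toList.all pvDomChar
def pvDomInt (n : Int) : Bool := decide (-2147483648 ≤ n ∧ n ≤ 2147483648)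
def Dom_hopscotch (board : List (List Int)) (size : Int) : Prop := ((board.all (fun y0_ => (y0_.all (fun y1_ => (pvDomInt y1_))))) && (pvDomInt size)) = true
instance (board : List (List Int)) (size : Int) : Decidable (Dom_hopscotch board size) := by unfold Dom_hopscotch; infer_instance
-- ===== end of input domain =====

-- B replaces A's per-column rebuild of a 3-element temp list (and a max() over it) by a single
-- top-two pass over the previous row's first four entries.  Like A, B mutates the rows
-- board[1..size-1] in place; the equivalence proved here is about the return value.

-- ===== PORT A =====
def hopscotch (board : List (List Int)) (size : Int) : Int :=
  let sum_list := (PySem.List.pyGet? board 0).getD []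
  let final := (PySem.List.pyRange 1 size 1).foldl (fun sl s =>
    let current := (PySem.List.pyGet? board s).getD []
    (PySem.List.pyRange 0 4 1).foldl (fun cur i =>
      let temp := (PySem.List.pyRange 0 4 1).foldl (fun t j =>
        if i ≠ j then t ++ [PySem.List.pyGetD sl j 0] else t) []
      PySem.List.pySetD cur i
        (PySem.List.pyGetD cur i 0 + (PySem.List.max? temp (fun y => y)).getD 0)) current) sum_list
  (PySem.List.max? final (fun y => y)).getD 0

-- ===== PORT B =====
-- the two largest of the four values, largest first (duplicates kept); Source B's if-chain
def pvTopTwo (a b c d : Int) : Int × Int :=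
  let p := if a ≥ b then (a, b) else (b, a)
  let q := if c > p.1 then (c, p.1) else if c > p.2 then (p.1, c) else p
  if d > q.1 then (d, q.1) else if d > q.2 then (q.1, d) else q

def hopscotch_alt (board : List (List Int)) (size : Int) : Int :=
  let sum_list := (PySem.List.pyGet? board 0).getD []
  let final := (PySem.List.pyRange 1 size 1).foldl (fun sl s =>
    let current := (PySem.List.pyGet? board s).getD []
    let m := pvTopTwo (PySem.List.pyGetD sl 0 0) (PySem.List.pyGetD sl 1 0)
                      (PySem.List.pyGetD sl 2 0) (PySem.List.pyGetD sl 3 0)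
    (PySem.List.pyRange 0 4 1).foldl (fun cur i =>
      PySem.List.pySetD cur i
        (PySem.List.pyGetD cur i 0 + (if PySem.List.pyGetD sl i 0 = m.1 then m.2 else m.1))) current) sum_list
  (PySem.List.max? final (fun y => y)).getD 0

-- ===== PRECONDITION & SPEC =====
-- Pre_ is exactly where the Python A returns without raising: when size ≤ 1 the loop never runs
-- and max(board[0]) needs board[0] to exist and be nonempty; otherwise rows 0..size-1 must exist
-- and have ≥ 4 entries (A indexes sum_list[j] and current[i] for i,j in range(4)).
def Pre_hopscotch (board : List (List Int)) (size : Int) : Prop :=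
  if size ≤ 1 then board ≠ [] ∧ board.headD [] ≠ []
  else size.toNat ≤ board.length ∧ ∀ r ∈ board.take size.toNat, 4 ≤ r.length
instance (board : List (List Int)) (size : Int) : Decidable (Pre_hopscotch board size) := by
  unfold Pre_hopscotch; infer_instance

def pvWitness_hopscotch : List (List Int) × Int := ([[1, 2, 3, 4], [5, 6, 7, 8]], 2)

def Spec_hopscotch (board : List (List Int)) (size : Int) (out : Int) : Prop := out = hopscotch_alt board size
instance (board : List (List Int)) (size : Int) (out : Int) : Decidable (Spec_hopscotch board size out) := by unfold Spec_hopscotch; infer_instance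

-- ===== CLAIM (what is proved, stated in full; the proofs are below) =====
def Claim_equal_hopscotch : Prop := ∀ (board : List (List Int)) (size : Int), Dom_hopscotch board size → Pre_hopscotch board size → Spec_hopscotch board size (hopscotch board size)

-- ===== LEMMAS AND PROOFS =====

-- A's loop body over one row, as a named step function
def pvStepA (board : List (List Int)) (sl : List Int) (s : Int) : List Int :=
  let current := (PySem.List.pyGet? board s).getD []
  (PySem.List.pyRange 0 4 1).foldl (fun cur i =>
    let temp := (PySem.List.pyRange 0 4 1).foldl (fun t j =>
      if i ≠ j then t ++ [PySem.List.pyGetD sl j 0] else t) []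
    PySem.List.pySetD cur i
      (PySem.List.pyGetD cur i 0 + (PySem.List.max? temp (fun y => y)).getD 0)) current

-- B's loop body over one row
def pvStepB (board : List (List Int)) (sl : List Int) (s : Int) : List Int :=
  let current := (PySem.List.pyGet? board s).getD []
  let m := pvTopTwo (PySem.List.pyGetD sl 0 0) (PySem.List.pyGetD sl 1 0)
                    (PySem.List.pyGetD sl 2 0) (PySem.List.pyGetD sl 3 0)
  (PySem.List.pyRange 0 4 1).foldl (fun cur i =>
    PySem.List.pySetD cur i
      (PySem.List.pyGetD cur i 0 + (if PySem.List.pyGetD sl i 0 = m.1 then m.2 else m.1))) current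

lemma pvHopscotch_eq (board : List (List Int)) (size : Int) :
    hopscotch board size =
      (PySem.List.max? ((PySem.List.pyRange 1 size 1).foldl (pvStepA board)
        ((PySem.List.pyGet? board 0).getD [])) (fun y => y)).getD 0 := rfl

lemma pvHopscotchAlt_eq (board : List (List Int)) (size : Int) :
    hopscotch_alt board size =
      (PySem.List.max? ((PySem.List.pyRange 1 size 1).foldl (pvStepB board)
        ((PySem.List.pyGet? board 0).getD [])) (fun y => y)).getD 0 := rfl

lemma pvRange4 : PySem.List.pyRange 0 4 1 = [0, 1, 2, 3] := by decide

-- for each column, the max over the other three of the four values is m2 if the column holds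
-- the max m1, else m1 — with (m1, m2) the top two kept by pvTopTwo
set_option maxHeartbeats 1000000 in
lemma pvTopTwo_spec (a b c d : Int) :
    (b ⊔ (c ⊔ d) = if a = (pvTopTwo a b c d).1 then (pvTopTwo a b c d).2 else (pvTopTwo a b c d).1) ∧
    (a ⊔ (c ⊔ d) = if b = (pvTopTwo a b c d).1 then (pvTopTwo a b c d).2 else (pvTopTwo a b c d).1) ∧
    (a ⊔ (b ⊔ d) = if c = (pvTopTwo a b c d).1 then (pvTopTwo a b c d).2 else (pvTopTwo a b c d).1) ∧
    (a ⊔ (b ⊔ c) = if d = (pvTopTwo a b c d).1 then (pvTopTwo a b c d).2 else (pvTopTwo a b c d).1) := by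
  refine ⟨?_, ?_, ?_, ?_⟩ <;>
    · simp only [pvTopTwo]
      split_ifs <;> dsimp only <;> omega

set_option maxHeartbeats 1000000 in
lemma pvStep_eq (board : List (List Int)) (sl : List Int) (s : Int) (h : 4 ≤ sl.length) :
    pvStepA board sl s = pvStepB board sl s := by
  obtain ⟨a, b, c, d, r, rfl⟩ : ∃ a b c d r, sl = a :: b :: c :: d :: r := by
    match sl, h with
    | a :: b :: c :: d :: r, _ => exact ⟨a, b, c, d, r, rfl⟩
  obtain ⟨h0, h1, h2, h3⟩ := pvTopTwo_spec a b c d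
  simp only [pvStepA, pvStepB, pvRange4, List.foldl]
  norm_num [PySem.List.pyGetD_ofNat', PySem.List.max?_id_cons, List.foldl]
  rw [h0, h1, h2, h3]

lemma pvStepA_length (board : List (List Int)) (sl : List Int) (s : Int) :
    (pvStepA board sl s).length = ((PySem.List.pyGet? board s).getD []).length := by
  simp [pvStepA, pvRange4, List.foldl]

lemma pvFold_eq (board : List (List Int)) (L : List Int) (sl : List Int) (hsl : 4 ≤ sl.length)
    (hL : ∀ s ∈ L, 4 ≤ ((PySem.List.pyGet? board s).getD []).length) :
    L.foldl (pvStepA board) sl = L.foldl (pvStepB board) sl := by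
  induction L generalizing sl with
  | nil => rfl
  | cons s t ih =>
      have hs : 4 ≤ ((PySem.List.pyGet? board s).getD []).length := hL s (by simp)
      simp only [List.foldl]
      rw [← pvStep_eq board sl s hsl]
      exact ih (pvStepA board sl s) (by rw [pvStepA_length]; exact hs)
        (fun x hx => hL x (by simp [hx]))

-- ===== VERDICT (by name: the statement is the Claim_ definition above) =====
theorem hopscotch_spec : Claim_equal_hopscotch := by
  intro board size _ hpre
  show hopscotch board size = hopscotch_alt board size
  rw [pvHopscotch_eq, pvHopscotchAlt_eq]
  by_cases hsz : size ≤ 1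
  · rw [PySem.List.pyRange_one_eq_nil hsz]
    rfl
  · simp only [Pre_hopscotch, if_neg (by omega : ¬ size ≤ 1)] at hpre
    obtain ⟨hlen, hrows⟩ := hpre
    obtain ⟨r0, rest, rfl⟩ : ∃ r0 rest, board = r0 :: rest := by
      cases board with
      | nil => simp at hlen; omega
      | cons x xs => exact ⟨x, xs, rfl⟩
    have hr0 : 4 ≤ r0.length := by
      refine hrows r0 ?_
      rw [List.mem_take_iff_getElem]
      exact ⟨0, by omega, rfl⟩
    rw [pvFold_eq]
    · rw [PySem.List.pyGet?_zero_cons]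
      exact hr0
    · intro s hs
      rw [PySem.List.mem_pyRange_one] at hs
      have hlt : s.toNat < (r0 :: rest).length := by omega
      rw [PySem.List.pyGet?_of_nonneg _ (by omega : (0:Int) ≤ s)]
      rw [List.getElem?_eq_getElem hlt]
      refine hrows _ ?_
      rw [List.mem_take_iff_getElem]
      exact ⟨s.toNat, by omega, rfl⟩
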